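-- pv_equiv track=rewrite | github.com/nickc1/skccm | skCCM/utilities.py | conflicting_indices
-- ===== SOURCE A (Python) =====
-- def conflicting_indices(X):
-- 	"""
-- 	Finds where the indices are in the rest of feature matrix. This assures
-- 	that the correct indices are dropped.
--
-- 	X : The embed indices. This is the same shape as the actual embedded time
-- 		series.
-- 	"""
--
-- 	conf_ind = []
-- 	for i in range(len(X)):
--
-- 		inds = [] #where to store
--
-- 		#iterate through all other rows
-- 		for j in range(len(X)):
--
-- 			#check where they intersect
-- 			if len(set( X[i] ).intersection( X[j] ))>0:
-- 				inds.append(j)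
--
-- 		conf_ind.append(inds)
--
-- 	return conf_ind
-- ===== SOURCE B (Python) =====
-- def conflicting_indices(X):
--     """Inverted index: map each value to the rows containing it, then the
--     conflicting rows of a row are the union of those lists."""
--     index = {}
--     for j, row in enumerate(X):
--         for v in row:
--             index.setdefault(v, []).append(j)
--     out = []
--     for row in X:
--         seen = set()
--         for v in row:
--             seen.update(index.get(v, []))
--         out.append(sorted(seen))
--     return out
-- ===== Notes on version B (the rewrite author's own statement) =====
-- stated objective: faster
-- what changed: Replaced the all-pairs set-intersection double loop by an inverted index value->rows built in one pass, so each row's conflicting rows are the sorted union of the index lists of its values.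
import Mathlib
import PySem

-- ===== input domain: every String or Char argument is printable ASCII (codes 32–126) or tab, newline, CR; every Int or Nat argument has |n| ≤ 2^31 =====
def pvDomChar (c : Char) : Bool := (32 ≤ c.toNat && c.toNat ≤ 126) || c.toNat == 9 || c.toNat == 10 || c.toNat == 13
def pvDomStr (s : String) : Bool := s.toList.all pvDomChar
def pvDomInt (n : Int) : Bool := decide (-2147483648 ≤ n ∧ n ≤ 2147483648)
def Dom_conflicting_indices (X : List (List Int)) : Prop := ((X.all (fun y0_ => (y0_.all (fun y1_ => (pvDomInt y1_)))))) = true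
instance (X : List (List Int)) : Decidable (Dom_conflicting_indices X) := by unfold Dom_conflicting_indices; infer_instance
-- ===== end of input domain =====

-- B replaces A's all-pairs set-intersection double loop by an inverted index value -> rows (objective: faster).

-- ===== PORT A =====
def conflicting_indices (X : List (List Int)) : List (List Int) :=
  (PySem.List.pyRange 0 (X.length : Int) 1).foldl (fun conf_ind i =>
    conf_ind ++ [(PySem.List.pyRange 0 (X.length : Int) 1).foldl (fun inds j =>
      if PySem.Set.len (PySem.Set.inter (PySem.Set.ofList (PySem.List.pyGetD X i []))
            (PySem.List.pyGetD X j [])) > 0 then inds ++ [j] else inds) []]) []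

-- ===== PORT B =====
def conflicting_indices_alt (X : List (List Int)) : List (List Int) :=
  let index : PySem.Dict Int (List Int) :=
    (PySem.List.enumerate X 0).foldl (fun index p =>
      p.2.foldl (fun index v => index.modify v [] (· ++ [p.1])) index) PySem.Dict.empty
  X.foldl (fun out row =>
    let seen : PySem.Set Int :=
      row.foldl (fun seen v => PySem.Set.update seen (index.getD v [])) PySem.Set.empty
    out ++ [PySem.List.sorted seen (fun x => x) false]) []

-- ===== PRECONDITION & SPEC =====
def Spec_conflicting_indices (X : List (List Int)) (out : List (List Int)) : Prop := out = conflicting_indices_alt X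
instance (X : List (List Int)) (out : List (List Int)) : Decidable (Spec_conflicting_indices X out) := by unfold Spec_conflicting_indices; infer_instance

-- ===== CLAIM (what is proved, stated in full; the proofs are below) =====
def Claim_equal_conflicting_indices : Prop := ∀ (X : List (List Int)), Dom_conflicting_indices X → Spec_conflicting_indices X (conflicting_indices X)

-- ===== LEMMAS AND PROOFS =====

-- B's inverted index as one foldl over the flattened (value, row) pairs
def pvPairs (X : List (List Int)) : List (Int × Int) :=
  (PySem.List.enumerate X 0).flatMap (fun p => p.2.map (fun v => (v, p.1)))

lemma pv_foldl_modify_flat (l : List (Int × List Int)) (d : PySem.Dict Int (List Int)) :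
    l.foldl (fun d p => p.2.foldl (fun d v => d.modify v [] (· ++ [p.1])) d) d
    = (l.flatMap (fun p => p.2.map (fun v => (v, p.1)))).foldl
        (fun d q => d.modify q.1 [] (· ++ [q.2])) d := by
  induction l generalizing d with
  | nil => rfl
  | cons p l ih => simp [List.foldl_append, ih, List.foldl_map]

lemma pv_mem_index (X : List (List Int)) (v j : Int) :
    j ∈ ((PySem.List.enumerate X 0).foldl (fun index p =>
           p.2.foldl (fun index v => index.modify v [] (· ++ [p.1])) index)
           PySem.Dict.empty).getD v []
    ↔ ∃ k : Nat, ∃ _ : k < X.length, v ∈ X[k] ∧ j = (k : Int) := by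
  rw [pv_foldl_modify_flat, PySem.Dict.getD_foldl_modify_append]
  simp only [PySem.Dict.getD_empty, List.nil_append, List.mem_map, List.mem_filter,
    List.mem_flatMap, PySem.List.mem_enumerate_iff, beq_iff_eq]
  constructor
  · rintro ⟨⟨w, i⟩, ⟨⟨⟨ki, rowi⟩, ⟨k, hk, hpair⟩, hw⟩, hv⟩, hj⟩
    cases hpair
    obtain ⟨v', hv', hv'w⟩ := hw
    exact ⟨k, hk, by simp_all⟩
  · rintro ⟨k, hk, hvk, rfl⟩
    exact ⟨(v, (k : Int)), ⟨⟨((k : Int), X[k]), ⟨k, hk, by simp⟩, v, hvk, by simp⟩, rfl⟩, rfl⟩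

lemma pv_mem_foldl_update (g : Int → List Int) (row : List Int) (s : PySem.Set Int) (y : Int) :
    y ∈ row.foldl (fun s v => PySem.Set.update s (g v)) s ↔ y ∈ s ∨ ∃ v ∈ row, y ∈ g v := by
  induction row generalizing s with
  | nil => simp
  | cons v row ih =>
    simp only [List.foldl_cons, ih, PySem.Set.mem_update, List.mem_cons]
    constructor
    · rintro ((h | h) | ⟨w, hw, hyw⟩)
      exacts [Or.inl h, Or.inr ⟨v, Or.inl rfl, h⟩, Or.inr ⟨w, Or.inr hw, hyw⟩]
    · rintro (h | ⟨w, (rfl | hw), hyw⟩)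
      exacts [Or.inl (Or.inl h), Or.inl (Or.inr hyw), Or.inr ⟨w, hw, hyw⟩]

lemma pv_nodup_foldl_update (g : Int → List Int) (row : List Int) (s : PySem.Set Int)
    (hs : s.Nodup) : (row.foldl (fun s v => PySem.Set.update s (g v)) s).Nodup := by
  induction row generalizing s with
  | nil => exact hs
  | cons v row ih => exact ih _ (PySem.Set.nodup_update s (g v) hs)

lemma pv_inter_pos (row t : List Int) :
    0 < PySem.Set.len (PySem.Set.inter (PySem.Set.ofList row) t) ↔ ∃ v ∈ row, v ∈ t := by
  simp only [PySem.Set.len, Int.natCast_pos, List.length_pos_iff_exists_mem]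
  constructor
  · rintro ⟨y, hy⟩
    rw [PySem.Set.mem_inter] at hy
    exact ⟨y, (PySem.Set.mem_ofList row y).mp hy.1, hy.2⟩
  · rintro ⟨v, hv, hvt⟩
    exact ⟨v, (PySem.Set.mem_inter _ _ _).mpr ⟨(PySem.Set.mem_ofList row v).mpr hv, hvt⟩⟩

-- per-row agreement: the sorted union of index lists is A's filtered range
lemma pv_row_eq (X : List (List Int)) (row : List Int) :
    (PySem.List.pyRange 0 (X.length : Int) 1).foldl (fun inds j =>
        if PySem.Set.len (PySem.Set.inter (PySem.Set.ofList row)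
              (PySem.List.pyGetD X j [])) > 0 then inds ++ [j] else inds) []
    = PySem.List.sorted
        (row.foldl (fun seen v =>
          PySem.Set.update seen (((PySem.List.enumerate X 0).foldl (fun index p =>
            p.2.foldl (fun index v => index.modify v [] (· ++ [p.1])) index)
            PySem.Dict.empty).getD v [])) PySem.Set.empty)
        (fun x => x) false := by
  have hfold := PySem.List.foldl_append_if
    (fun j => decide (0 < PySem.Set.len (PySem.Set.inter (PySem.Set.ofList row)
      (PySem.List.pyGetD X j [])))) (fun j => j)
    (PySem.List.pyRange 0 (X.length : Int) 1) []
  simp only [decide_eq_true_eq, List.map_id', List.nil_append] at hfold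
  rw [hfold]
  symm
  apply PySem.List.sorted_eq_of_perm_of_pairwise_lt
  · rw [List.perm_ext_iff_of_nodup
      (List.Nodup.filter _ (PySem.List.nodup_pyRange_one 0 (X.length : Int)))
      (pv_nodup_foldl_update _ row PySem.Set.empty (by simp [PySem.Set.empty]))]
    intro j
    rw [List.mem_filter, PySem.List.mem_pyRange_one, decide_eq_true_eq,
      pv_mem_foldl_update]
    simp only [PySem.Set.empty, List.not_mem_nil, false_or, pv_mem_index, pv_inter_pos]
    constructor
    · rintro ⟨⟨h0, hn⟩, v, hv, hvj⟩
      refine ⟨v, hv, j.toNat, by omega, ?_, by omega⟩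
      rwa [PySem.List.pyGetD_eq_getElem X [] h0 (by exact_mod_cast hn)] at hvj
    · rintro ⟨v, hv, k, hk, hvk, rfl⟩
      refine ⟨⟨by positivity, by exact_mod_cast hk⟩, v, hv, ?_⟩
      rwa [PySem.List.pyGetD_eq_getElem X [] (by positivity) (by exact_mod_cast hk)]
  · exact List.Pairwise.filter _ (PySem.List.pairwise_lt_pyRange_one 0 (X.length : Int))

lemma pv_maps (X : List (List Int)) (G : List Int → List Int) :
    X.map G = (PySem.List.pyRange 0 (X.length : Int) 1).map
      (fun i => G (PySem.List.pyGetD X i [])) := by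
  conv_lhs => rw [← PySem.List.map_pyGetD_pyRange_zero' X []]
  rw [List.map_map]
  rfl

-- ===== VERDICT (by name: the statement is the Claim_ definition above) =====
theorem conflicting_indices_spec : Claim_equal_conflicting_indices := by
  intro X _
  unfold Spec_conflicting_indices conflicting_indices conflicting_indices_alt
  rw [PySem.List.foldl_append_singleton_eq_map, PySem.List.foldl_append_singleton_eq_map,
    List.nil_append, List.nil_append,
    pv_maps X (fun row => PySem.List.sorted
      (row.foldl (fun seen v =>
        PySem.Set.update seen (((PySem.List.enumerate X 0).foldl (fun index p =>
          p.2.foldl (fun index v => index.modify v [] (· ++ [p.1])) index)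
          PySem.Dict.empty).getD v [])) PySem.Set.empty)
      (fun x => x) false)]
  apply List.map_congr_left
  intro i _
  exact pv_row_eq X (PySem.List.pyGetD X i [])
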